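-- pv_equiv track=rewrite | github.com/leeygang/wildrobot | skills/wildrobot-training-analyze/scripts/compare_offline_runs.py | _pick_keys
-- ===== SOURCE A (Python) =====
-- from typing import Any, Dict, List, Optional, Tuple
--
-- def _pick_keys(rows: List[Dict[str, Any]]) -> Tuple[str, str, str]:
--     if any("eval_push/success_rate" in r for r in rows):
--         return ("eval_push", "eval_push/success_rate", "eval_push/episode_length")
--     if any("eval/success_rate" in r for r in rows):
--         return ("eval", "eval/success_rate", "eval/episode_length")
--     if any("env/success_rate" in r for r in rows):
--         return ("env", "env/success_rate", "env/episode_length")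
--     return ("train", "success_rate", "episode_length")
-- ===== SOURCE B (Python) =====
-- _TABLE = [
--     ("eval_push", "eval_push/success_rate", "eval_push/episode_length"),
--     ("eval", "eval/success_rate", "eval/episode_length"),
--     ("env", "env/success_rate", "env/episode_length"),
--     ("train", "success_rate", "episode_length"),
-- ]
-- _RANK = {
--     "eval_push/success_rate": 0,
--     "eval/success_rate": 1,
--     "env/success_rate": 2,
-- }
--
-- def _pick_keys(rows):
--     best = 3
--     for r in rows:
--         for k in r:
--             best = min(best, _RANK.get(k, 3))
--     return _TABLE[best]
-- ===== Notes on version B (the rewrite author's own statement) =====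
-- stated objective: alternative
-- what changed: Replaces A's three priority-ordered any()-scans and hard-coded return branches by a data-driven formulation: each key is mapped to a numeric priority rank via a lookup table, a single pass computes the minimum rank seen, and the result is read out of a tuple table indexed by that rank.
import Mathlib
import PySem

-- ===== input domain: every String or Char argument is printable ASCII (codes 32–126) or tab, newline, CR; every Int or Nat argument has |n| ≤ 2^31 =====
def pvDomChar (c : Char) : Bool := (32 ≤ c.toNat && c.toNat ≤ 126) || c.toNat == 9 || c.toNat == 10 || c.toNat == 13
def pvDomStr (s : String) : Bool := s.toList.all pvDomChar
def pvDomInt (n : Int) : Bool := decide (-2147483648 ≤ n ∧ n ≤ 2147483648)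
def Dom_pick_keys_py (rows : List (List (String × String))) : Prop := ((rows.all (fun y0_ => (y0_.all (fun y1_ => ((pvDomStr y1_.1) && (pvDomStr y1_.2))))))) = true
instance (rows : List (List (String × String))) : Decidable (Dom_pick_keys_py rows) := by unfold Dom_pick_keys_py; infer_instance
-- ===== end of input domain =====

-- B replaces A's three priority-ordered any()-scans and hard-coded branches by a rank table: one pass
-- computes the minimum priority rank of the keys seen, and the answer is read out of a tuple table (alternative).

-- ===== PORT A =====
-- 'k in r' on a dict r = key membership in the association list
def pick_keys_py (rows : List (List (String × String))) : String × String × String :=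
  if rows.any (fun r => r.any (fun kv => kv.1 == "eval_push/success_rate")) then
    ("eval_push", "eval_push/success_rate", "eval_push/episode_length")
  else if rows.any (fun r => r.any (fun kv => kv.1 == "eval/success_rate")) then
    ("eval", "eval/success_rate", "eval/episode_length")
  else if rows.any (fun r => r.any (fun kv => kv.1 == "env/success_rate")) then
    ("env", "env/success_rate", "env/episode_length")
  else
    ("train", "success_rate", "episode_length")

-- ===== PORT B =====
-- the module-level _TABLE of result tuples
def pkTable : List (String × String × String) :=
  [("eval_push", "eval_push/success_rate", "eval_push/episode_length"),
   ("eval", "eval/success_rate", "eval/episode_length"),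
   ("env", "env/success_rate", "env/episode_length"),
   ("train", "success_rate", "episode_length")]

-- _RANK.get(k, 3): lookup in the literal three-entry dict with default 3
def pkRank (k : String) : Nat :=
  if k == "eval_push/success_rate" then 0
  else if k == "eval/success_rate" then 1
  else if k == "env/success_rate" then 2
  else 3

def pick_keys_py_alt (rows : List (List (String × String))) : String × String × String :=
  let best := rows.foldl (fun b r => r.foldl (fun a kv => min a (pkRank kv.1)) b) 3
  -- _TABLE[best]: getD is exact here since best ≤ 3 < 4 always, so Python never raises
  pkTable.getD best ("train", "success_rate", "episode_length")

-- ===== PRECONDITION & SPEC =====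
def Spec_pick_keys_py (rows : List (List (String × String))) (out : String × String × String) : Prop := out = pick_keys_py_alt rows
instance (rows : List (List (String × String))) (out : String × String × String) : Decidable (Spec_pick_keys_py rows out) := by unfold Spec_pick_keys_py; infer_instance

-- ===== CLAIM (what is proved, stated in full; the proofs are below) =====
def Claim_equal_pick_keys_py : Prop := ∀ (rows : List (List (String × String))), Dom_pick_keys_py rows → Spec_pick_keys_py rows (pick_keys_py rows)

-- ===== LEMMAS AND PROOFS =====

-- the priority value of a list of rows, written as A writes it
def pkVal (rows : List (List (String × String))) : Nat :=
  if rows.any (fun r => r.any (fun kv => kv.1 == "eval_push/success_rate")) then 0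
  else if rows.any (fun r => r.any (fun kv => kv.1 == "eval/success_rate")) then 1
  else if rows.any (fun r => r.any (fun kv => kv.1 == "env/success_rate")) then 2
  else 3

-- one row's min-fold = min of the seed with the row's priority value (seeds stay ≤ 3 throughout)
theorem row_fold_min (r : List (String × String)) :
    ∀ b : Nat, b ≤ 3 → r.foldl (fun a kv => min a (pkRank kv.1)) b = min b (pkVal [r]) := by
  induction r with
  | nil => intro b hb; simp [pkVal]; omega
  | cons kv r ih =>
      intro b hb
      rw [List.foldl_cons, ih _ (le_trans (Nat.min_le_left _ _) hb)]
      rcases Bool.eq_false_or_eq_true (kv.1 == "eval_push/success_rate") with h1 | h1 <;>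
        rcases Bool.eq_false_or_eq_true (kv.1 == "eval/success_rate") with h2 | h2 <;>
          rcases Bool.eq_false_or_eq_true (kv.1 == "env/success_rate") with h3 | h3 <;>
            rcases Bool.eq_false_or_eq_true (r.any fun kv => kv.1 == "eval_push/success_rate") with p1 | p1 <;>
              rcases Bool.eq_false_or_eq_true (r.any fun kv => kv.1 == "eval/success_rate") with p2 | p2 <;>
                rcases Bool.eq_false_or_eq_true (r.any fun kv => kv.1 == "env/success_rate") with p3 | p3 <;>
                  simp [pkVal, pkRank, h1, h2, h3, p1, p2, p3, min_def] <;> split_ifs <;> omega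

-- the whole fold = min of the seed with the priority value of all rows
theorem fold_min (rows : List (List (String × String))) :
    ∀ b : Nat, b ≤ 3 →
      rows.foldl (fun b r => r.foldl (fun a kv => min a (pkRank kv.1)) b) b = min b (pkVal rows) := by
  induction rows with
  | nil => intro b hb; simp [pkVal]; omega
  | cons r rows ih =>
      intro b hb
      rw [List.foldl_cons, row_fold_min r b hb,
        ih _ (le_trans (Nat.min_le_left _ _) hb)]
      rcases Bool.eq_false_or_eq_true (r.any fun kv => kv.1 == "eval_push/success_rate") with p1 | p1 <;>
        rcases Bool.eq_false_or_eq_true (r.any fun kv => kv.1 == "eval/success_rate") with p2 | p2 <;>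
          rcases Bool.eq_false_or_eq_true (r.any fun kv => kv.1 == "env/success_rate") with p3 | p3 <;>
            rcases Bool.eq_false_or_eq_true (rows.any fun r => r.any fun kv => kv.1 == "eval_push/success_rate") with q1 | q1 <;>
              rcases Bool.eq_false_or_eq_true (rows.any fun r => r.any fun kv => kv.1 == "eval/success_rate") with q2 | q2 <;>
                rcases Bool.eq_false_or_eq_true (rows.any fun r => r.any fun kv => kv.1 == "env/success_rate") with q3 | q3 <;>
                  simp [pkVal, p1, p2, p3, q1, q2, q3, min_def] <;> split_ifs <;> omega

-- ===== VERDICT (by name: the statement is the Claim_ definition above) =====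
theorem pick_keys_py_spec : Claim_equal_pick_keys_py := by
  intro rows _
  unfold Spec_pick_keys_py pick_keys_py pick_keys_py_alt
  simp only [fold_min rows 3 (by omega), pkVal]
  split_ifs <;> rfl
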